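-- pv_equiv track=rewrite | github.com/zmwangx/Project-Euler | 604/solution.py | F
-- ===== SOURCE A (Python) =====
-- import math
--
-- def precompute_totients(limit):
--     pp = [0] * (limit + 1)
--     tt = [0] * (limit + 1)
--     tt[1] = 1
--     # Sieve.
--     for n in range(2, limit + 1):
--         if pp[n] == 0:
--             tt[n] = n - 1
--             for m in range(2 * n, limit + 1, n):
--                 pp[m] = n
--         else:
--             p = pp[n]
--             m = n // p
--             ppow = p
--             while m % p == 0:
--                 m //= p
--                 ppow *= p
--             if m == 1:
--                 tt[n] = n * (p - 1) // p
--             else: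
--                 tt[n] = tt[ppow] * tt[m]
--     return tt
--
-- def F(n):
--     totient = precompute_totients(3_000_000)
--     count = 2
--     i = 3
--     cumulative_sum = 1
--     while True:
--         t = totient[i]
--         new_sum = cumulative_sum + i * t // 2
--         if new_sum <= n:
--             count += t
--             cumulative_sum = new_sum
--             i += 1
--         else:
--             count += ((n - cumulative_sum) // i) * 2
--             cumulative_sum += ((n - cumulative_sum) // i) * i
--             break
--     remaining = n - cumulative_sum
--     for j in range(i // 2, 0, -1):
--         if math.gcd(j, i) == 1:
--             break
--     if i - j <= remaining:
--         count += 1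
--     return count
-- ===== SOURCE B (Python) =====
-- import math
--
-- def _phi(m):
--     # Euler's totient by trial division (no precomputed sieve).
--     result = m
--     p = 2
--     while p * p <= m:
--         if m % p == 0:
--             while m % p == 0:
--                 m //= p
--             result -= result // p
--         p += 1
--     if m > 1:
--         result -= result // m
--     return result
--
-- def F(n):
--     count = 2
--     i = 3
--     s = 1
--     while True:
--         t = _phi(i)
--         new_sum = s + i * t // 2
--         if new_sum <= n:
--             count += t
--             s = new_sum
--             i += 1
--         else:
--             k = (n - s) // i
--             count += 2 * k
--             s += k * i
--             break
--     remaining = n - s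
--     j = 1
--     for c in range(i // 2, 1, -1):
--         if math.gcd(c, i) == 1:
--             j = c
--             break
--     if i - j <= remaining:
--         count += 1
--     return count
-- ===== Notes on version B (the rewrite author's own statement) =====
-- stated objective: faster
-- what changed: A precomputes a fixed 3,000,000-entry totient sieve (smallest-prime-factor table plus multiplicative recursion) on every call; B drops the sieve entirely and computes each needed phi(i) on demand by trial-division factorization, visiting only the ~n^(1/3) indices the summation loop reaches.
import Mathlib
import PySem

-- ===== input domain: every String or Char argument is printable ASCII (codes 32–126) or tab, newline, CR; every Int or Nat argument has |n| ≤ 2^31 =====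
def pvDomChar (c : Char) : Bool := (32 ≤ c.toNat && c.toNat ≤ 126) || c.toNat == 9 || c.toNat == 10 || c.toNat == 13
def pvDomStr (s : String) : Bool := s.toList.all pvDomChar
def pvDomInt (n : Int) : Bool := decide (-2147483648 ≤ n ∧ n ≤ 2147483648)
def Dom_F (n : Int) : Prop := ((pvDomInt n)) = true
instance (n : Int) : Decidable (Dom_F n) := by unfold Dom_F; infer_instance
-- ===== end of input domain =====

-- B drops A's fixed 3,000,000-entry totient sieve and computes φ(i) on demand by
-- trial division for the ≈n^(1/3) indices the summation loop actually visits (objective: faster).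

-- ===== PORT A =====
-- Python lists pp/tt are ported as Array Int; every index used by A is nonneg and
-- in bounds (proved in the lemmas below), where aget/aset are exact for Python's a[i] / a[i]=v.
def aget (a : Array Int) (i : Int) : Int := a.getD i.toNat 0
def aset (a : Array Int) (i : Int) (v : Int) : Array Int := a.setIfInBounds i.toNat v

-- 'while m % p == 0: m //= p; ppow *= p'.  The guard 2 ≤ p ∧ 1 ≤ m only makes the
-- recursion total; at every call A makes, p is a prime ≥ 2 and m ≥ 1, so it is exact.
def stripA (p m ppow : Int) : Int × Int :=
  if h : 2 ≤ p ∧ 1 ≤ m ∧ PySem.Int.mod m p = 0 then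
    stripA p (PySem.Int.floordiv m p) (ppow * p)
  else (m, ppow)
termination_by m.toNat
decreasing_by
  have h1 := PySem.Int.floordiv_mul_add_mod m p
  have h2 : 0 < PySem.Int.floordiv m p := by
    by_contra hc
    push Not at hc
    nlinarith [h.2.2, h1]
  have h3 : PySem.Int.floordiv m p < m := by nlinarith [h.2.2, h1, h2, h.1]
  omega

-- body of 'for n in range(2, limit+1)'
def sieveStep (limit : Int) (s : Array Int × Array Int) (n : Int) : Array Int × Array Int :=
  let pp := s.1
  let tt := s.2
  if aget pp n = 0 then
    let tt := aset tt n (n - 1)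
    let pp := (PySem.List.pyRange (2 * n) (limit + 1) n).foldl (fun a m => aset a m n) pp
    (pp, tt)
  else
    let p := aget pp n
    let m0 := PySem.Int.floordiv n p
    let r := stripA p m0 p
    if r.1 = 1 then (pp, aset tt n (PySem.Int.floordiv (n * (p - 1)) p))
    else (pp, aset tt n (aget tt r.2 * aget tt r.1))

def precomputeTotients (limit : Int) : Array Int :=
  let pp : Array Int := Array.replicate (limit + 1).toNat 0
  let tt : Array Int := Array.replicate (limit + 1).toNat 0
  let tt := aset tt 1 1
  ((PySem.List.pyRange 2 (limit + 1) 1).foldl (sieveStep limit) (pp, tt)).2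

-- the 'while True' summation loop; fuel n.toNat + 2 is enough on every |n| ≤ 2^31
-- (each non-break step raises cumulative_sum by at least 3)
def loopA (tt : Array Int) (n : Int) : Nat → Int → Int → Int → Int × Int × Int
  | 0, count, i, s => (count, i, s)
  | f + 1, count, i, s =>
    let t := aget tt i
    let newSum := s + PySem.Int.floordiv (i * t) 2
    if newSum ≤ n then loopA tt n f (count + t) (i + 1) newSum
    else (count + PySem.Int.floordiv (n - s) i * 2, i, s + PySem.Int.floordiv (n - s) i * i)

-- 'for j in range(i//2, 0, -1): if gcd(j,i)==1: break'; the accumulator holds the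
-- last loop value (Python's leftover j).  Initial 0 is Python's unbound j: unreachable, i ≥ 3.
def jSearchA (i : Int) (js : List Int) (j : Int) : Int :=
  match js with
  | [] => j
  | a :: rest => if Int.gcd a i = 1 then a else jSearchA i rest a

def F (n : Int) : Int :=
  let totient := precomputeTotients 3000000
  let r := loopA totient n (n.toNat + 2) 2 3 1
  let count := r.1
  let i := r.2.1
  let s := r.2.2
  let remaining := n - s
  let j := jSearchA i (PySem.List.pyRange (PySem.Int.floordiv i 2) 0 (-1)) 0
  if i - j ≤ remaining then count + 1 else count

-- ===== PORT B =====
-- 'while m % p == 0: m //= p' (guard 2 ≤ p ∧ 1 ≤ m for totality only; exact at every call B makes)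
def stripB (p m : Int) : Int :=
  if h : 2 ≤ p ∧ 1 ≤ m ∧ PySem.Int.mod m p = 0 then stripB p (PySem.Int.floordiv m p)
  else m
termination_by m.toNat
decreasing_by
  have h1 := PySem.Int.floordiv_mul_add_mod m p
  have h2 : 0 < PySem.Int.floordiv m p := by
    by_contra hc
    push Not at hc
    nlinarith [h.2.2, h1]
  have h3 : PySem.Int.floordiv m p < m := by nlinarith [h.2.2, h1, h2, h.1]
  omega

theorem stripB_le (p m : Int) (hm : 1 ≤ m) : stripB p m ≤ m := by
  rw [stripB]
  split
  · rename_i h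
    have h1 := PySem.Int.floordiv_mul_add_mod m p
    have h2 : 0 < PySem.Int.floordiv m p := by
      by_contra hc
      push Not at hc
      nlinarith [h.2.2, h1]
    have h3 : PySem.Int.floordiv m p < m := by nlinarith [h.2.2, h1, h.1]
    have hrec := stripB_le p (PySem.Int.floordiv m p) h2
    omega
  · omega
termination_by m.toNat
decreasing_by
  omega

-- 'while p * p <= m: …; p += 1' of _phi (guard 2 ≤ p for totality only)
def phiLoop (m result p : Int) : Int × Int :=
  if h : p * p ≤ m ∧ 2 ≤ p then
    if PySem.Int.mod m p = 0 then
      phiLoop (stripB p m) (result - PySem.Int.floordiv result p) (p + 1)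
    else phiLoop m result (p + 1)
  else (m, result)
termination_by (m.toNat + 2) - p.toNat
decreasing_by
  · have hm1 : (1 : Int) ≤ m := by nlinarith [h.1, h.2]
    have hle := stripB_le p m hm1
    have hpm : p < m := by nlinarith [h.1, h.2]
    omega
  · have hpm : p < m := by nlinarith [h.1, h.2]
    omega

def phiB (m : Int) : Int :=
  let r := phiLoop m m 2
  if r.1 > 1 then r.2 - PySem.Int.floordiv r.2 r.1 else r.2

def loopB (n : Int) : Nat → Int → Int → Int → Int × Int × Int
  | 0, count, i, s => (count, i, s)
  | f + 1, count, i, s =>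
    let t := phiB i
    let newSum := s + PySem.Int.floordiv (i * t) 2
    if newSum ≤ n then loopB n f (count + t) (i + 1) newSum
    else
      let k := PySem.Int.floordiv (n - s) i
      (count + 2 * k, i, s + k * i)

def jSearchB (i : Int) (cs : List Int) : Int :=
  match cs with
  | [] => 1
  | c :: rest => if Int.gcd c i = 1 then c else jSearchB i rest

def F_alt (n : Int) : Int :=
  let r := loopB n (n.toNat + 2) 2 3 1
  let count := r.1
  let i := r.2.1
  let s := r.2.2
  let remaining := n - s
  let j := jSearchB i (PySem.List.pyRange (PySem.Int.floordiv i 2) 1 (-1))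
  if i - j ≤ remaining then count + 1 else count

-- ===== PRECONDITION & SPEC =====
def Spec_F (n : Int) (out : Int) : Prop := out = F_alt n
instance (n : Int) (out : Int) : Decidable (Spec_F n out) := by unfold Spec_F; infer_instance

-- ===== CLAIM (what is proved, stated in full; the proofs are below) =====
def Claim_equal_F : Prop := ∀ (n : Int), Dom_F n → Spec_F n (F n)

-- ===== LEMMAS AND PROOFS =====

-- (↑(·.toNat.totient) : Int), the value both programs compute for each index
def phiI (k : Int) : Int := (Nat.totient k.toNat : Int)

theorem fdiv_exact (a p : Int) (hp : 0 < p) (h : p ∣ a) : PySem.Int.floordiv a p * p = a := by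
  have h1 := PySem.Int.floordiv_mul_add_mod a p
  have h2 : PySem.Int.mod a p = 0 := (PySem.Int.mod_eq_zero_iff_dvd a p).mpr h
  omega

theorem aset_size (a : Array Int) (i v : Int) : (aset a i v).size = a.size :=
  Array.size_setIfInBounds

theorem aget_aset_self (a : Array Int) (i v : Int) (h : i.toNat < a.size) :
    aget (aset a i v) i = v := by
  unfold aget aset
  rw [Array.getD]
  simp only [Array.size_setIfInBounds]
  rw [dif_pos h]
  simp [Array.getElem_setIfInBounds_self]

theorem aget_aset_ne (a : Array Int) (i k v : Int) (h : i.toNat ≠ k.toNat) :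
    aget (aset a i v) k = aget a k := by
  unfold aget aset
  rw [Array.getD, Array.getD]
  simp only [Array.size_setIfInBounds]
  by_cases hk : k.toNat < a.size
  · rw [dif_pos hk, dif_pos hk]
    exact Array.getElem_setIfInBounds_ne hk (fun hh => h hh)
  · rw [dif_neg hk, dif_neg hk]

theorem aget_replicate (n : Nat) (k : Int) : aget (Array.replicate n (0 : Int)) k = 0 := by
  unfold aget
  rw [Array.getD]
  by_cases hk : k.toNat < (Array.replicate n (0 : Int)).size
  · rw [dif_pos hk]
    exact Array.getElem_replicate _
  · rw [dif_neg hk]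

-- ===== strip characterizations =====
theorem stripB_spec (p m : Int) (hp : 2 ≤ p) (hm : 1 ≤ m) :
    ∃ e : Nat, m = stripB p m * p ^ e ∧ ¬ (p ∣ stripB p m) ∧ 1 ≤ stripB p m := by
  rw [stripB]
  split
  · rename_i h
    have h1 := PySem.Int.floordiv_mul_add_mod m p
    have h2 : 0 < PySem.Int.floordiv m p := by
      by_contra hc
      push Not at hc
      nlinarith [h.2.2, h1]
    have h3 : PySem.Int.floordiv m p < m := by nlinarith [h.2.2, h1]
    obtain ⟨e, he1, he2, he3⟩ := stripB_spec p (PySem.Int.floordiv m p) hp h2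
    refine ⟨e + 1, ?_, he2, he3⟩
    have : PySem.Int.floordiv m p * p = m := by omega
    rw [pow_succ]
    nlinarith [he1]
  · rename_i h
    push Not at h
    have hnd : ¬ (p ∣ m) := by
      intro hd
      exact absurd ((PySem.Int.mod_eq_zero_iff_dvd m p).mpr hd) (h hp hm)
    exact ⟨0, by ring, hnd, hm⟩
termination_by m.toNat
decreasing_by omega

theorem stripA_eq_stripB (p m w : Int) (hp : 2 ≤ p) (hm : 1 ≤ m) :
    ∃ e : Nat, stripA p m w = (stripB p m, w * p ^ e) ∧ m = stripB p m * p ^ e := by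
  rw [stripA, stripB]
  by_cases hc : 2 ≤ p ∧ 1 ≤ m ∧ PySem.Int.mod m p = 0
  · rw [dif_pos hc, dif_pos hc]
    have h1 := PySem.Int.floordiv_mul_add_mod m p
    have h2 : 0 < PySem.Int.floordiv m p := by
      by_contra hk
      push Not at hk
      nlinarith [hc.2.2, h1]
    obtain ⟨e, he1, he2⟩ := stripA_eq_stripB p (PySem.Int.floordiv m p) (w * p) hp h2
    refine ⟨e + 1, ?_, ?_⟩
    · rw [he1, pow_succ]
      ring_nf
    · have hmm : PySem.Int.floordiv m p * p = m := by omega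
      rw [pow_succ]
      nlinarith [he2]
  · rw [dif_neg hc, dif_neg hc]
    exact ⟨0, by ring_nf, by ring⟩
termination_by m.toNat
decreasing_by
  have h1 := PySem.Int.floordiv_mul_add_mod m p
  have h3 : PySem.Int.floordiv m p < m := by nlinarith [hc.2.2, h1]
  omega

-- ===== φ by trial division equals the totient =====
theorem toNat_dvd_of_int_dvd (p m : Int) (hp : 0 ≤ p) (h : p ∣ m) : p.toNat ∣ m.toNat := by
  rcases h with ⟨c, rfl⟩
  by_cases hc : 0 ≤ c
  · exact ⟨c.toNat, by rw [Int.toNat_mul hp hc]⟩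
  · have hn : p * c ≤ 0 := mul_nonpos_of_nonneg_of_nonpos hp (by omega)
    simp [Int.toNat_of_nonpos hn]

theorem int_dvd_of_toNat_dvd (p m : Int) (hp : 0 ≤ p) (hm : 0 ≤ m) (h : p.toNat ∣ m.toNat) : p ∣ m := by
  have := Int.natCast_dvd_natCast.mpr h
  rwa [Int.toNat_of_nonneg hp, Int.toNat_of_nonneg hm] at this

theorem prime_of_dvd_min (p m : Int) (hp : 2 ≤ p) (hd : p ∣ m)
    (hq : ∀ q : Int, 2 ≤ q → q.toNat.Prime → q ∣ m → p ≤ q) : p.toNat.Prime := by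
  have hne : p.toNat ≠ 1 := by omega
  have hq0 : p.toNat.minFac.Prime := Nat.minFac_prime hne
  have hdvd : (p.toNat.minFac : Int) ∣ p := by
    have h1 : (p.toNat.minFac : Int) ∣ (p.toNat : Int) := Int.natCast_dvd_natCast.mpr (Nat.minFac_dvd _)
    rwa [Int.toNat_of_nonneg (by omega)] at h1
  have hle : p ≤ (p.toNat.minFac : Int) :=
    hq _ (by exact_mod_cast hq0.two_le) (by simpa using hq0) (hdvd.trans hd)
  have hge : p.toNat.minFac ≤ p.toNat := Nat.minFac_le (by omega)
  have : p.toNat.minFac = p.toNat := by omega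
  exact Nat.prime_def_minFac.mpr ⟨by omega, this⟩

theorem phiI_mul_prime_pow (p m' : Int) (e : Nat) (hp2 : 2 ≤ p) (hp : p.toNat.Prime)
    (hm : 1 ≤ m') (hnd : ¬ p ∣ m') (he : 1 ≤ e) :
    phiI (m' * p ^ e) = p ^ (e - 1) * (p - 1) * phiI m' := by
  have hppos : (0:Int) ≤ p := by omega
  have hmpos : (0:Int) ≤ m' := by omega
  have htn : (m' * p ^ e).toNat = m'.toNat * p.toNat ^ e := by
    rw [Int.toNat_mul hmpos (by positivity), Int.toNat_pow_of_nonneg hppos]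
  have hnd' : ¬ p.toNat ∣ m'.toNat := by
    intro hcon
    exact hnd (int_dvd_of_toNat_dvd p m' hppos hmpos hcon)
  have hcop : Nat.Coprime m'.toNat (p.toNat ^ e) :=
    ((Nat.Prime.coprime_iff_not_dvd hp).mpr hnd').symm.pow_right e
  have hmul : (m'.toNat * p.toNat ^ e).totient = m'.toNat.totient * (p.toNat ^ e).totient :=
    Nat.totient_mul hcop
  have hpow : (p.toNat ^ e).totient = p.toNat ^ (e - 1) * (p.toNat - 1) :=
    Nat.totient_prime_pow hp (by omega)
  unfold phiI
  rw [htn, hmul, hpow]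
  have h2 : (1:Nat) ≤ p.toNat := by omega
  push_cast [Nat.cast_sub h2]
  rw [Int.toNat_of_nonneg hppos]
  ring

theorem phiLoop_spec (m result p : Int) (hp : 2 ≤ p) (hm : 1 ≤ m) (hd : m ∣ result)
    (hr : 1 ≤ result)
    (hq : ∀ q : Int, 2 ≤ q → q.toNat.Prime → q ∣ m → p ≤ q) :
    1 ≤ (phiLoop m result p).1 ∧
    ((phiLoop m result p).1 = 1 ∨ (phiLoop m result p).1.toNat.Prime) ∧
    (phiLoop m result p).2 * phiI (phiLoop m result p).1 * m
      = result * phiI m * (phiLoop m result p).1 ∧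
    (phiLoop m result p).1 ∣ (phiLoop m result p).2 ∧ 1 ≤ (phiLoop m result p).2 := by
  rw [phiLoop]
  by_cases hg : p * p ≤ m ∧ 2 ≤ p
  · rw [dif_pos hg]
    by_cases hmod : PySem.Int.mod m p = 0
    · rw [if_pos hmod]
      have hpm : p ∣ m := (PySem.Int.mod_eq_zero_iff_dvd m p).mp hmod
      have hprime : p.toNat.Prime := prime_of_dvd_min p m hp hpm hq
      obtain ⟨e, hse, hsnd, hs1⟩ := stripB_spec p m hp hm
      set m' := stripB p m with hm'
      have he1 : 1 ≤ e := by
        rcases Nat.eq_zero_or_pos e with h0 | h0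
        · exfalso
          rw [h0, pow_zero, mul_one] at hse
          exact hsnd (hse ▸ hpm)
        · omega
      obtain ⟨E, rfl⟩ : ∃ E, e = E + 1 := ⟨e - 1, by omega⟩
      have hpr : p ∣ result := dvd_trans hpm hd
      obtain ⟨c, hc⟩ := hd
      have hc1 : 1 ≤ c := by nlinarith [hc]
      have hex : PySem.Int.floordiv result p * p = result := fdiv_exact result p (by omega) hpr
      set d := PySem.Int.floordiv result p with hdd
      have hde : d = m' * p ^ E * c := by
        have : d * p = m' * p ^ E * c * p := by
          rw [hex, hc, hse, pow_succ]; ring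
        have hpne : p ≠ 0 := by omega
        exact mul_right_cancel₀ hpne this
      have hrd : result - d = m' * p ^ E * c * (p - 1) := by
        have hres : result = m' * p ^ E * c * p := by
          rw [hc, hse, pow_succ]; ring
        rw [hde, hres]; ring
      have hppow : (1:Int) ≤ p ^ E := one_le_pow₀ (by omega)
      have hr' : 1 ≤ result - d := by nlinarith [hrd, hppow]
      have hd' : m' ∣ result - d := ⟨p ^ E * c * (p - 1), by rw [hrd]; ring⟩
      have hq' : ∀ q : Int, 2 ≤ q → q.toNat.Prime → q ∣ m' → p + 1 ≤ q := by
        intro q h2 hqp hqd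
        have hqm : q ∣ m := hqd.trans ⟨p ^ (E + 1), hse⟩
        have := hq q h2 hqp hqm
        rcases lt_or_eq_of_le this with hlt | heq
        · omega
        · exact absurd (heq ▸ hqd) hsnd
      have IH := phiLoop_spec m' (result - d) (p + 1) (by omega) hs1 hd' hr' hq'
      refine ⟨IH.1, IH.2.1, ?_, IH.2.2.2⟩
      have hphi : phiI m = p ^ E * (p - 1) * phiI m' := by
        rw [hse]
        have := phiI_mul_prime_pow p m' (E + 1) hp hprime hs1 hsnd (by omega)
        simpa using this
      have heq := IH.2.2.1
      set R := phiLoop m' (result - d) (p + 1)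
      -- multiply the recursive equation through by p ^ (E + 1)
      calc R.2 * phiI R.1 * m = (R.2 * phiI R.1 * m') * p ^ (E + 1) := by rw [hse]; ring
        _ = ((result - d) * phiI m' * R.1) * p ^ (E + 1) := by rw [heq]
        _ = result * phiI m * R.1 := by
            rw [hrd, hphi, hc, hse, pow_succ]
            ring
    · rw [if_neg hmod]
      have hnd : ¬ p ∣ m := fun hdd => hmod ((PySem.Int.mod_eq_zero_iff_dvd m p).mpr hdd)
      have hq' : ∀ q : Int, 2 ≤ q → q.toNat.Prime → q ∣ m → p + 1 ≤ q := by
        intro q h2 hqp hqd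
        have := hq q h2 hqp hqd
        rcases lt_or_eq_of_le this with hlt | heq
        · omega
        · exact absurd (heq ▸ hqd) hnd
      exact phiLoop_spec m result (p + 1) (by omega) hm hd hr hq'
  · rw [dif_neg hg]
    have hlt : m < p * p := by
      by_contra hcon
      push Not at hcon
      exact hg ⟨hcon, hp⟩
    refine ⟨hm, ?_, by ring, hd, hr⟩
    rcases lt_or_eq_of_le hm with h1 | h1
    · right
      have hne : m.toNat ≠ 1 := by omega
      have hq0 : m.toNat.minFac.Prime := Nat.minFac_prime hne
      have hdvd : (m.toNat.minFac : Int) ∣ m := by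
        have h2 : (m.toNat.minFac : Int) ∣ (m.toNat : Int) := Int.natCast_dvd_natCast.mpr (Nat.minFac_dvd _)
        rwa [Int.toNat_of_nonneg (by omega)] at h2
      have hle : p ≤ (m.toNat.minFac : Int) :=
        hq _ (by exact_mod_cast hq0.two_le) (by simpa using hq0) hdvd
      by_contra hnp
      have hsq : m.toNat.minFac * m.toNat.minFac ≤ m.toNat := by
        have := Nat.minFac_sq_le_self (by omega) hnp
        nlinarith [this]
      have : (m.toNat.minFac * m.toNat.minFac : Int) ≤ m := by
        push_cast
        calc ((m.toNat.minFac : Int)) * m.toNat.minFac ≤ (m.toNat : Int) := by exact_mod_cast hsq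
          _ = m := Int.toNat_of_nonneg (by omega)
      nlinarith [hle]
    · left; omega
termination_by (m.toNat + 2) - p.toNat
decreasing_by
  · have hm1 : (1 : Int) ≤ m := hm
    have hle := stripB_le p m hm1
    have hpm2 : p < m := by nlinarith [hg.1, hg.2]
    omega
  · have hpm2 : p < m := by nlinarith [hg.1, hg.2]
    omega

theorem phiB_eq (m : Int) (hm : 1 ≤ m) : phiB m = phiI m := by
  have H := phiLoop_spec m m 2 (by omega) hm dvd_rfl hm
    (fun q h2 hqp _ => h2)
  simp only [phiB]
  set r := phiLoop m m 2 with hr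
  obtain ⟨h1, h2, h3, h4, h5⟩ := H
  rcases h2 with hone | hprime
  · have hphi1 : phiI 1 = 1 := by unfold phiI; norm_num
    rw [hone, hphi1] at h3
    rw [hone, if_neg (by omega : ¬ ((1:Int) > 1))]
    have hmne : m ≠ 0 := by omega
    refine mul_right_cancel₀ hmne ?_
    linear_combination h3
  · have hq2 : 2 ≤ r.1 := by
      have h2 := hprime.two_le
      omega
    rw [if_pos (by omega : r.1 > 1)]
    have hex : PySem.Int.floordiv r.2 r.1 * r.1 = r.2 := fdiv_exact r.2 r.1 (by omega) h4
    set d := PySem.Int.floordiv r.2 r.1 with hdd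
    have hphi1 : phiI r.1 = r.1 - 1 := by
      unfold phiI
      rw [Nat.totient_prime hprime]
      have : (1:Nat) ≤ r.1.toNat := by omega
      push_cast [Nat.cast_sub this]
      rw [Int.toNat_of_nonneg (by omega)]
    rw [hphi1] at h3
    have hkey : (r.2 - d) * (r.1 * m) = phiI m * (r.1 * m) := by
      have hrd : r.2 - d = d * (r.1 - 1) := by rw [← hex]; ring
      nlinarith [h3, hex, hrd]
    have hne : r.1 * m ≠ 0 := by positivity
    exact mul_right_cancel₀ hne hkey
-- ===== sieve correctness =====
theorem phiI_one : phiI 1 = 1 := by unfold phiI; norm_num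

theorem phiI_prime (p : Int) (h2 : 2 ≤ p) (hp : p.toNat.Prime) : phiI p = p - 1 := by
  unfold phiI
  rw [Nat.totient_prime hp]
  have h1 : (1:Nat) ≤ p.toNat := by omega
  push_cast [Nat.cast_sub h1]
  rw [Int.toNat_of_nonneg (by omega)]

theorem phiI_prime_pow (p : Int) (e : Nat) (h2 : 2 ≤ p) (hp : p.toNat.Prime) (he : 1 ≤ e) :
    phiI (p ^ e) = p ^ (e - 1) * (p - 1) := by
  have := phiI_mul_prime_pow p 1 e h2 hp (by omega) (by
    intro hc
    have := Int.le_of_dvd (by omega) hc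
    omega) he
  rw [one_mul] at this
  rw [this, phiI_one, mul_one]

theorem toNat_inj_pos (a b : Int) (ha : 1 ≤ a) (hb : 1 ≤ b) (h : a ≠ b) : a.toNat ≠ b.toNat := by
  omega

theorem foldl_aset_size (l : List Int) (a : Array Int) (v : Int) :
    (l.foldl (fun b m => aset b m v) a).size = a.size := by
  induction l generalizing a with
  | nil => rfl
  | cons x l ih => rw [List.foldl_cons, ih, aset_size]

theorem foldl_aset_get (l : List Int) (a : Array Int) (v k : Int) (hk : 1 ≤ k)
    (hl : ∀ x ∈ l, 1 ≤ x ∧ x.toNat < a.size) :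
    aget (l.foldl (fun b m => aset b m v) a) k = if k ∈ l then v else aget a k := by
  induction l generalizing a with
  | nil => simp
  | cons x l ih =>
    rw [List.foldl_cons]
    have hx := hl x (by simp)
    have hl' : ∀ y ∈ l, 1 ≤ y ∧ y.toNat < (aset a x v).size := by
      intro y hy
      rw [aset_size]
      exact hl y (by simp [hy])
    rw [ih (aset a x v) hl']
    by_cases hmem : k ∈ l
    · simp [hmem]
    · by_cases hkx : k = x
      · subst hkx
        simp [hmem, aget_aset_self a k v hx.2]
      · have : aget (aset a x v) k = aget a k :=
          aget_aset_ne a x k v (toNat_inj_pos x k hx.1 hk (fun hh => hkx hh.symm))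
        simp [hmem, hkx, this]

-- the invariant after the outer loop has processed 2, …, b-1
def SieveInv (L b : Int) (st : Array Int × Array Int) : Prop :=
  st.1.size = (L + 1).toNat ∧ st.2.size = (L + 1).toNat ∧
  (∀ k : Int, 1 ≤ k → k < b → aget st.2 k = phiI k) ∧
  (∀ m : Int, 2 ≤ m → m ≤ L →
    (aget st.1 m = 0 ∨
      (2 ≤ aget st.1 m ∧ (aget st.1 m).toNat.Prime ∧ aget st.1 m ∣ m ∧ aget st.1 m < m)) ∧
    (aget st.1 m = 0 → ∀ p : Int, 2 ≤ p → p < b → p.toNat.Prime → p ∣ m → ¬ p < m))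

theorem sieveStep_inv (L b : Int) (st : Array Int × Array Int) (hL : 2 ≤ L)
    (hb2 : 2 ≤ b) (hbL : b ≤ L) (h : SieveInv L b st) :
    SieveInv L (b + 1) (sieveStep L st b) := by
  obtain ⟨hs1, hs2, htt, hpp⟩ := h
  simp only [sieveStep]
  by_cases hz : aget st.1 b = 0
  · -- b is prime
    rw [if_pos hz]
    have hbprime : b.toNat.Prime := by
      have hmf : b.toNat.minFac.Prime := Nat.minFac_prime (by omega)
      have hmfd : (b.toNat.minFac : Int) ∣ b := by
        have h1 : (b.toNat.minFac : Int) ∣ (b.toNat : Int) :=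
          Int.natCast_dvd_natCast.mpr (Nat.minFac_dvd _)
        rwa [Int.toNat_of_nonneg (by omega)] at h1
      have hmfle : b.toNat.minFac ≤ b.toNat := Nat.minFac_le (by omega)
      by_cases hlt : (b.toNat.minFac : Int) < b
      · exact absurd hlt
          ((hpp b hb2 hbL).2 hz _ (by exact_mod_cast hmf.two_le) hlt (by simpa using hmf) hmfd)
      · have : b.toNat.minFac = b.toNat := by omega
        exact Nat.prime_def_minFac.mpr ⟨by omega, this⟩
    refine ⟨?_, ?_, ?_, ?_⟩
    · simpa [foldl_aset_size] using hs1
    · simpa [aset_size] using hs2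
    · intro k hk1 hkb
      by_cases hkb' : k = b
      · subst hkb'
        rw [aget_aset_self st.2 k (k - 1) (by omega), phiI_prime k hb2 hbprime]
      · rw [aget_aset_ne st.2 b k (b - 1) (toNat_inj_pos b k (by omega) hk1 (fun hh => hkb' hh.symm))]
        exact htt k hk1 (by omega)
    · intro m hm2 hmL
      have hrange : ∀ x ∈ PySem.List.pyRange (2 * b) (L + 1) b, 1 ≤ x ∧ x.toNat < st.1.size := by
        intro x hx
        rw [PySem.List.mem_pyRange_iff_of_pos (by omega)] at hx
        constructor
        · omega
        · rw [hs1]; omega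
      rw [foldl_aset_get _ _ _ _ (by omega) hrange]
      by_cases hmem : m ∈ PySem.List.pyRange (2 * b) (L + 1) b
      · rw [if_pos hmem]
        rw [PySem.List.mem_pyRange_iff_of_pos (by omega)] at hmem
        obtain ⟨c, hc⟩ := hmem.2.2
        have hdvd : b ∣ m := ⟨c + 2, by linear_combination hc⟩
        refine ⟨Or.inr ⟨hb2, hbprime, hdvd, by omega⟩, ?_⟩
        intro hcon
        omega
      · rw [if_neg hmem]
        refine ⟨(hpp m hm2 hmL).1, ?_⟩
        intro h0 p hp2 hpb hpprime hpd hplt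
        by_cases hpb' : p = b
        · subst hpb'
          apply hmem
          rw [PySem.List.mem_pyRange_iff_of_pos (by omega)]
          obtain ⟨c, rfl⟩ := hpd
          have hc2 : 2 ≤ c := by nlinarith [hplt]
          refine ⟨by nlinarith, by omega, ⟨c - 2, by ring⟩⟩
        · exact (hpp m hm2 hmL).2 h0 p hp2 (by omega) hpprime hpd hplt
  · -- b is composite; p := pp[b] is a prime factor of b
    rw [if_neg hz]
    obtain ⟨hppb, -⟩ := hpp b hb2 hbL
    rcases hppb with h0 | ⟨hp2, hpprime, hpd, hplt⟩
    · exact absurd h0 hz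
    set p := aget st.1 b with hpdef
    have hexact : PySem.Int.floordiv b p * p = b := fdiv_exact b p (by omega) hpd
    set m0 := PySem.Int.floordiv b p with hm0def
    have hm02 : 2 ≤ m0 := by nlinarith [hexact, hplt, hp2]
    obtain ⟨e, hsa, hsb⟩ := stripA_eq_stripB p m0 p hp2 (by omega)
    obtain ⟨e', hse', hsnd, hs1'⟩ := stripB_spec p m0 hp2 (by omega)
    set m' := stripB p m0 with hm'def
    have hbfact : b = m' * p ^ (e + 1) := by
      rw [pow_succ, ← mul_assoc, ← hsb, hexact]
    have hppow2 : (2:Int) ≤ p ^ (e + 1) :=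
      le_trans hp2 (le_self_pow₀ (by omega) (by omega))
    have hbnotprime : ¬ b.toNat.Prime := by
      intro hcon
      have hdn := toNat_dvd_of_int_dvd p b (by omega) hpd
      have := Nat.Prime.eq_one_or_self_of_dvd hcon p.toNat hdn
      omega
    have hpack : ∀ V : Int, V = phiI b → SieveInv L (b + 1) (st.1, aset st.2 b V) := by
      intro V hV
      refine ⟨hs1, by simpa [aset_size] using hs2, ?_, ?_⟩
      · intro k hk1 hkb
        by_cases hkb' : k = b
        · subst hkb'
          rw [aget_aset_self st.2 k V (by rw [hs2]; omega), hV]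
        · rw [aget_aset_ne st.2 b k V (toNat_inj_pos b k (by omega) hk1 (fun hh => hkb' hh.symm))]
          exact htt k hk1 (by omega)
      · intro m hm2 hmL
        refine ⟨(hpp m hm2 hmL).1, ?_⟩
        intro h0 p' hp'2 hp'b hp'prime hp'd hp'lt
        by_cases hp'b' : p' = b
        · rw [hp'b'] at hp'prime
          exact absurd hp'prime hbnotprime
        · exact (hpp m hm2 hmL).2 h0 p' hp'2 (by omega) hp'prime hp'd hp'lt
    rw [hsa]
    by_cases hm1 : m' = 1
    · rw [if_pos hm1]
      apply hpack
      have hb2' : b = p ^ (e + 1) := by rw [hbfact, hm1, one_mul]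
      have hphib : phiI b = p ^ e * (p - 1) := by
        rw [hb2']
        have := phiI_prime_pow p (e + 1) hp2 hpprime (by omega)
        simpa using this
      have hpd2 : p ∣ b * (p - 1) := hpd.mul_right _
      have hx : PySem.Int.floordiv (b * (p - 1)) p * p = b * (p - 1) :=
        fdiv_exact _ p (by omega) hpd2
      have hy : PySem.Int.floordiv (b * (p - 1)) p * p = (p ^ e * (p - 1)) * p := by
        rw [hx, hb2', pow_succ]; ring
      rw [hphib]
      exact mul_right_cancel₀ (show p ≠ 0 by omega) hy
    · rw [if_neg hm1]
      apply hpack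
      have hm'2 : 2 ≤ m' := by
        have := hs1'
        omega
      have hlt1 : p * p ^ e < b := by nlinarith [hbfact, hppow2, hm'2]
      have hlt2 : m' < b := by nlinarith [hbfact, hppow2, hm'2]
      have h1 : aget st.2 (p * p ^ e) = phiI (p ^ (e + 1)) := by
        rw [show p * p ^ e = p ^ (e + 1) by rw [pow_succ]; ring]
        exact htt _ (one_le_pow₀ (by omega)) (by rwa [show p * p ^ e = p ^ (e + 1) by rw [pow_succ]; ring] at hlt1)
      have h2 : aget st.2 m' = phiI m' := htt _ (by omega) hlt2
      have hphipow : phiI (p ^ (e + 1)) = p ^ e * (p - 1) := by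
        have := phiI_prime_pow p (e + 1) hp2 hpprime (by omega)
        simpa using this
      have hphib : phiI b = p ^ e * (p - 1) * phiI m' := by
        rw [hbfact]
        have := phiI_mul_prime_pow p m' (e + 1) hp2 hpprime (by omega) hsnd (by omega)
        simpa using this
      rw [h1, h2, hphipow, hphib]
theorem sieve_correct (L : Int) (hL : 2 ≤ L) (k : Int) (hk1 : 1 ≤ k) (hkL : k ≤ L) :
    aget (precomputeTotients L) k = phiI k := by
  have hinit : SieveInv L 2
      (Array.replicate (L + 1).toNat 0, aset (Array.replicate (L + 1).toNat 0) 1 1) := by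
    refine ⟨Array.size_replicate, by rw [aset_size]; exact Array.size_replicate, ?_, ?_⟩
    · intro kk hk1' hk2'
      have hkk : kk = 1 := by omega
      subst hkk
      rw [aget_aset_self _ _ _ (by rw [Array.size_replicate]; omega), phiI_one]
    · intro m hm2 hmL
      refine ⟨Or.inl (aget_replicate _ _), ?_⟩
      intro _ p hp2 hpb _ _ _
      omega
  have hfold : ∀ d : Nat, 2 + (d : Int) ≤ L + 1 →
      SieveInv L (2 + (d : Int))
        ((PySem.List.pyRange 2 (2 + (d : Int)) 1).foldl (sieveStep L)
          (Array.replicate (L + 1).toNat 0, aset (Array.replicate (L + 1).toNat 0) 1 1)) := by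
    intro d
    induction d with
    | zero =>
      intro _
      rw [show ((0:Nat):Int) = 0 by norm_num, add_zero,
        PySem.List.pyRange_one_eq_nil (le_refl 2)]
      exact hinit
    | succ d ih =>
      intro hd
      have hd' : 2 + (d : Int) ≤ L + 1 := by push_cast at hd ⊢; omega
      have hcast : 2 + ((d + 1 : Nat) : Int) = (2 + (d : Int)) + 1 := by push_cast; ring
      rw [hcast, PySem.List.pyRange_one_succ_right (by omega), List.foldl_append]
      simp only [List.foldl_cons, List.foldl_nil]
      exact sieveStep_inv L (2 + (d : Int)) _ hL (by omega) (by omega) (ih hd')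
  have hfin := hfold (L - 1).toNat (by omega)
  rw [show 2 + ((L - 1).toNat : Int) = L + 1 by omega] at hfin
  unfold precomputeTotients
  exact hfin.2.2.1 k hk1 (by omega)

-- ===== main summation loop: A with the table ≡ B with on-demand φ =====
theorem phiI_ge_two (i : Int) (h : 3 ≤ i) : 2 ≤ phiI i := by
  unfold phiI
  have h3 : 3 ≤ i.toNat := by omega
  have : 2 ≤ i.toNat.totient := by
    rcases Nat.lt_or_ge i.toNat.totient 2 with h2 | h2
    · exfalso
      interval_cases ht : i.toNat.totient
      · have := Nat.totient_pos.mpr (show 0 < i.toNat by omega); omega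
      · have := Nat.totient_eq_one_iff.mp ht; omega
    · exact h2
  exact_mod_cast this

theorem loopB_i_ge (n : Int) (f : Nat) (count i s : Int) (hi : 3 ≤ i) :
    3 ≤ (loopB n f count i s).2.1 := by
  induction f generalizing count i s with
  | zero => exact hi
  | succ f ih =>
    simp only [loopB]
    split
    · exact ih _ _ _ (by omega)
    · exact hi

theorem loop_eq (tt : Array Int) (n : Int) (hn : n ≤ 2147483648)
    (htt : ∀ k : Int, 1 ≤ k → k ≤ 3000000 → aget tt k = phiI k) :
    ∀ (f : Nat) (count i s : Int), 3 ≤ i → 2 * s ≥ i * i - i - 4 → (i = 3 ∨ s ≤ n) →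
      loopA tt n f count i s = loopB n f count i s := by
  intro f
  induction f with
  | zero => intro count i s _ _ _; rfl
  | succ f ih =>
    intro count i s hi hquad hsn
    have hibound : i ≤ 65536 := by
      rcases hsn with h3 | hsle
      · omega
      · by_contra hcon
        push Not at hcon
        have h1 : 65537 * 65537 ≤ i * i := by nlinarith
        have h2 : 65537 * i ≤ i * i := by nlinarith
        omega
    have htv : aget tt i = phiI i := htt i (by omega) (by omega)
    have hpv : phiB i = phiI i := phiB_eq i (by omega)
    have ht2 : 2 ≤ phiI i := phiI_ge_two i hi
    simp only [loopA, loopB, htv, hpv]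
    have hfd : PySem.Int.floordiv (i * phiI i) 2 = (i * phiI i) / 2 :=
      PySem.Int.floordiv_eq_ediv_of_pos (by omega)
    have h2i : 2 * i ≤ i * phiI i := by nlinarith
    by_cases hc : s + PySem.Int.floordiv (i * phiI i) 2 ≤ n
    · rw [if_pos hc, if_pos hc]
      refine ih _ _ _ (by omega) ?_ (Or.inr hc)
      rw [hfd] at hc ⊢
      have hexp : (i + 1) * (i + 1) = i * i + 2 * i + 1 := by ring
      omega
    · rw [if_neg hc, if_neg hc]
      rw [mul_comm (PySem.Int.floordiv (n - s) i) 2]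

theorem pyRange_down_to_zero (a : Int) (ha : 1 ≤ a) :
    PySem.List.pyRange a 0 (-1) = PySem.List.pyRange a 1 (-1) ++ [1] := by
  have h : ∀ d : Nat, ∀ a : Int, a = (d : Int) + 1 →
      PySem.List.pyRange a 0 (-1) = PySem.List.pyRange a 1 (-1) ++ [1] := by
    intro d
    induction d with
    | zero =>
      intro a ha'
      have ha1 : a = 1 := by push_cast at ha'; omega
      subst ha1
      rw [PySem.List.pyRange_neg_one_cons (by norm_num : (0:Int) < 1),
        show (1:Int) - 1 = 0 by norm_num,
        PySem.List.pyRange_neg_one_eq_nil (le_refl (0:Int)),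
        PySem.List.pyRange_neg_one_eq_nil (le_refl (1:Int))]
      rfl
    | succ d ih =>
      intro a ha'
      have h1 : (1:Int) < a := by omega
      rw [PySem.List.pyRange_neg_one_cons (by omega : (0:Int) < a),
        PySem.List.pyRange_neg_one_cons h1,
        ih (a - 1) (by push_cast at ha' ⊢; omega)]
      rfl
  exact h (a - 1).toNat a (by omega)

theorem jSearch_eq (i : Int) (l : List Int) (acc : Int) :
    jSearchA i (l ++ [1]) acc = jSearchB i l := by
  induction l generalizing acc with
  | nil =>
    simp only [List.nil_append, jSearchA, jSearchB]
    rw [if_pos (by simp)]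
  | cons x l ih =>
    simp only [List.cons_append, jSearchA, jSearchB]
    by_cases hg : Int.gcd x i = 1
    · rw [if_pos hg, if_pos hg]
    · rw [if_neg hg, if_neg hg]
      exact ih x

-- ===== VERDICT (by name: the statement is the Claim_ definition above) =====
theorem F_spec : Claim_equal_F := by
  intro n hdom
  unfold Spec_F
  simp only [F, F_alt]
  have hn : n ≤ 2147483648 := by
    unfold Dom_F pvDomInt at hdom
    simp only [decide_eq_true_eq] at hdom
    exact hdom.2
  have htt : ∀ k : Int, 1 ≤ k → k ≤ 3000000 → aget (precomputeTotients 3000000) k = phiI k :=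
    fun k h1 h2 => sieve_correct 3000000 (by norm_num) k h1 h2
  have hloop := loop_eq (precomputeTotients 3000000) n hn htt (n.toNat + 2) 2 3 1
    (by norm_num) (by norm_num) (Or.inl rfl)
  rw [hloop]
  have hi3 : 3 ≤ (loopB n (n.toNat + 2) 2 3 1).2.1 := loopB_i_ge n _ 2 3 1 (by norm_num)
  set r := loopB n (n.toNat + 2) 2 3 1 with hr
  have hhalf : 1 ≤ PySem.Int.floordiv r.2.1 2 := by
    rw [PySem.Int.floordiv_eq_ediv_of_pos (by norm_num)]
    omega
  rw [pyRange_down_to_zero _ hhalf, jSearch_eq]
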